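-- pv_equiv track=rewrite | github.com/ldsouzatest2/testwise | streamlit_app.py | generate_l8_array
-- ===== SOURCE A (Python) =====
-- from typing import Dict, List, Any, Tuple
--
-- def generate_l8_array(factors: Dict[str, List[str]]) -> List[Tuple]:
--     """Generate L8 orthogonal array (2^7 design)"""
--     l8_base = [
--         [0, 0, 0, 0, 0, 0, 0],
--         [0, 0, 0, 1, 1, 1, 1],
--         [0, 1, 1, 0, 0, 1, 1],
--         [0, 1, 1, 1, 1, 0, 0],
--         [1, 0, 1, 0, 1, 0, 1],
--         [1, 0, 1, 1, 0, 1, 0],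
--         [1, 1, 0, 0, 1, 1, 0],
--         [1, 1, 0, 1, 0, 0, 1]
--     ]
--
--     factor_names = list(factors.keys())[:8]  # Limit to 8 factors
--     combinations = []
--
--     for row in l8_base:
--         combination = []
--         for i, factor_name in enumerate(factor_names):
--             if i < len(row):
--                 level_index = row[i] % len(factors[factor_name])
--                 combination.append(factors[factor_name][level_index])
--             else:
--                 combination.append(factors[factor_name][0])
--         combinations.append(tuple(combination))
--
--     return combinations
-- ===== SOURCE B (Python) =====
-- def generate_l8_array(factors):
--     """Generate L8 orthogonal array (2^7 design) — column-first construction then zip."""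
--     l8_base = [
--         [0, 0, 0, 0, 0, 0, 0],
--         [0, 0, 0, 1, 1, 1, 1],
--         [0, 1, 1, 0, 0, 1, 1],
--         [0, 1, 1, 1, 1, 0, 0],
--         [1, 0, 1, 0, 1, 0, 1],
--         [1, 0, 1, 1, 0, 1, 0],
--         [1, 1, 0, 0, 1, 1, 0],
--         [1, 1, 0, 1, 0, 0, 1],
--     ]
--     names = list(factors)[:8]
--     columns = [
--         [factors[name][row[i] % len(factors[name])] if i < 7 else factors[name][0]
--          for row in l8_base]
--         for i, name in enumerate(names)
--     ]
--     if not columns: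
--         return [() for _ in l8_base]
--     return [tuple(r) for r in zip(*columns)]
-- ===== Notes on version B (the rewrite author's own statement) =====
-- stated objective: idiomatic
-- what changed: Replaces the row-major double loop with explicit append accumulators by a column-first construction: one 8-entry column per factor built by a comprehension, then zip(*columns) to produce the rows (with the empty-factors case returning eight empty tuples explicitly, since zip of no columns yields []).
import Mathlib
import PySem

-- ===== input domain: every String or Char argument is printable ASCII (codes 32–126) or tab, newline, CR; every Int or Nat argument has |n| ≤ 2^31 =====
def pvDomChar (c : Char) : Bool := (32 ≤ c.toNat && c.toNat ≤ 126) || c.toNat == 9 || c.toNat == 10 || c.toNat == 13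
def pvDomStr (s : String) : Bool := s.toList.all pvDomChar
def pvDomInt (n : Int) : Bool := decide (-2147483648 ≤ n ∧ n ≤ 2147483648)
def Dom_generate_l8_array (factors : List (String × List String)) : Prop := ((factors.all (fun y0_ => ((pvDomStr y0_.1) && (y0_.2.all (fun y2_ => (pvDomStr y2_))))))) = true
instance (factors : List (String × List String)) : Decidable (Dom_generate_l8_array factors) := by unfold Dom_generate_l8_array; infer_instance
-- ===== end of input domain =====

-- B builds one 8-entry column per factor and zips the columns into rows, instead of A's
-- row-major double loop with append accumulators; same values, idiomatic decomposition.

-- the L8 base matrix, a literal shared by both Pythons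
def pvL8Base : List (List Int) :=
  [[0, 0, 0, 0, 0, 0, 0],
   [0, 0, 0, 1, 1, 1, 1],
   [0, 1, 1, 0, 0, 1, 1],
   [0, 1, 1, 1, 1, 0, 0],
   [1, 0, 1, 0, 1, 0, 1],
   [1, 0, 1, 1, 0, 1, 0],
   [1, 1, 0, 0, 1, 1, 0],
   [1, 1, 0, 1, 0, 0, 1]]

-- ===== PORT A =====
def generate_l8_array (factors : List (String × List String)) : List (List String) :=
  let d := PySem.Dict.ofList factors
  let factor_names := (PySem.Dict.keys d).take 8
  pvL8Base.foldl (fun combinations row =>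
    let combination := (PySem.List.enumerate factor_names).foldl (fun combination p =>
      let levels := PySem.Dict.getD d p.2 []
      if p.1 < (row.length : Int) then
        let level_index := PySem.Int.mod (PySem.List.pyGetD row p.1 0) (levels.length : Int)
        combination ++ [(PySem.List.pyGet? levels level_index).getD ""]
      else
        combination ++ [(PySem.List.pyGet? levels 0).getD ""]) []
    combinations ++ [combination]) []

-- ===== PORT B =====
-- zip(*columns) on string lists: rows until the shortest column runs out
def pvZipStar : List (List String) → List (List String)
  | [] => []
  | c :: cs =>
    if h : (c :: cs).any List.isEmpty then []
    else
      ((c :: cs).map (fun l => l.headD "")) :: pvZipStar ((c :: cs).map List.tail)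
  termination_by cols => (cols.headD []).length
  decreasing_by
    simp only [List.map_cons, List.headD_cons]
    simp only [List.any_cons, Bool.or_eq_true, not_or] at h
    cases c with
    | nil => simp [List.isEmpty] at h
    | cons x xs => simp

def generate_l8_array_alt (factors : List (String × List String)) : List (List String) :=
  let d := PySem.Dict.ofList factors
  let names := (PySem.Dict.keys d).take 8
  let columns := (PySem.List.enumerate names).map (fun p =>
    let levels := PySem.Dict.getD d p.2 []
    pvL8Base.map (fun row =>
      if p.1 < 7 then
        (PySem.List.pyGet? levels (PySem.Int.mod (PySem.List.pyGetD row p.1 0) (levels.length : Int))).getD ""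
      else
        (PySem.List.pyGet? levels 0).getD ""))
  if columns.isEmpty then pvL8Base.map (fun _ => []) else pvZipStar columns

-- ===== PRECONDITION & SPEC =====
-- Pre_ excludes inputs where some of the (up to 8) used factors has an EMPTY level list:
-- there Python A raises (ZeroDivisionError from '% 0', or IndexError from '[0]').
def Pre_generate_l8_array (factors : List (String × List String)) : Prop :=
  ∀ name ∈ ((PySem.Dict.ofList factors).keys.take 8),
    PySem.Dict.getD (PySem.Dict.ofList factors) name [] ≠ []
instance (factors : List (String × List String)) : Decidable (Pre_generate_l8_array factors) := by
  unfold Pre_generate_l8_array; infer_instance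

def pvWitness_generate_l8_array : (List (String × List String)) :=
  [("temp", ["low", "high"]), ("speed", ["1", "2", "3"])]

def Spec_generate_l8_array (factors : List (String × List String)) (out : List (List String)) : Prop := out = generate_l8_array_alt factors
instance (factors : List (String × List String)) (out : List (List String)) : Decidable (Spec_generate_l8_array factors out) := by unfold Spec_generate_l8_array; infer_instance

-- ===== CLAIM (what is proved, stated in full; the proofs are below) =====
def Claim_equal_generate_l8_array : Prop := ∀ (factors : List (String × List String)), Dom_generate_l8_array factors → Pre_generate_l8_array factors → Spec_generate_l8_array factors (generate_l8_array factors)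

-- ===== LEMMAS AND PROOFS =====

-- zipping per-factor columns is the row-major map (the transpose fact behind zip(*columns))
theorem pvZipStar_map {alpha beta : Type} (f : alpha → beta → String) :
    ∀ (rows : List beta) (ps : List alpha), ps ≠ [] →
    pvZipStar (ps.map (fun p => rows.map (f p))) =
      rows.map (fun row => ps.map (fun p => f p row)) := by
  intro rows
  induction rows with
  | nil =>
    intro ps hps
    cases ps with
    | nil => exact absurd rfl hps
    | cons q qs => simp [pvZipStar, List.isEmpty]
  | cons r rs ih =>
    intro ps hps
    cases ps with
    | nil => exact absurd rfl hps
    | cons q qs =>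
      have hcols : ((q :: qs).map (fun p => (r :: rs).map (f p))) =
          (f q r :: rs.map (f q)) :: qs.map (fun p => f p r :: rs.map (f p)) := by
        simp
      rw [hcols, pvZipStar]
      rw [dif_neg (by simp [List.any_map, Function.comp, List.isEmpty])]
      have htails : ((f q r :: rs.map (f q)) :: qs.map (fun p => f p r :: rs.map (f p))).map List.tail =
          (q :: qs).map (fun p => rs.map (f p)) := by
        simp [List.map_map, Function.comp]
      have hheads : ((f q r :: rs.map (f q)) :: qs.map (fun p => f p r :: rs.map (f p))).map (fun l => l.headD "") =
          (q :: qs).map (fun p => f p r) := by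
        simp [List.map_map, Function.comp]
      rw [htails, hheads, ih (q :: qs) (by simp)]
      simp

-- every row of the L8 base matrix has 7 entries
theorem pvL8Base_row_len : ∀ row ∈ pvL8Base, ((row.length : Int)) = 7 := by decide

-- ===== VERDICT (by name: the statement is the Claim_ definition above) =====
theorem generate_l8_array_spec : Claim_equal_generate_l8_array := by
  intro factors _ _
  unfold Spec_generate_l8_array generate_l8_array generate_l8_array_alt
  simp only []
  set d := PySem.Dict.ofList factors with hd
  set names := (PySem.Dict.keys d).take 8 with hnames
  set ps := PySem.List.enumerate names with hps
  have hfold : ∀ (row : List Int),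
      ps.foldl (fun combination p =>
        if p.1 < (row.length : Int) then
          combination ++ [(PySem.List.pyGet? (PySem.Dict.getD d p.2 []) (PySem.Int.mod (PySem.List.pyGetD row p.1 0) (((PySem.Dict.getD d p.2 []).length : Int)))).getD ""]
        else
          combination ++ [(PySem.List.pyGet? (PySem.Dict.getD d p.2 []) 0).getD ""]) []
      = ps.map (fun p =>
          if p.1 < (row.length : Int) then
            (PySem.List.pyGet? (PySem.Dict.getD d p.2 []) (PySem.Int.mod (PySem.List.pyGetD row p.1 0) (((PySem.Dict.getD d p.2 []).length : Int)))).getD ""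
          else
            (PySem.List.pyGet? (PySem.Dict.getD d p.2 []) 0).getD "") := by
    intro row
    have hstep : (fun (combination : List String) (p : Int × String) =>
        if p.1 < (row.length : Int) then
          combination ++ [(PySem.List.pyGet? (PySem.Dict.getD d p.2 []) (PySem.Int.mod (PySem.List.pyGetD row p.1 0) (((PySem.Dict.getD d p.2 []).length : Int)))).getD ""]
        else
          combination ++ [(PySem.List.pyGet? (PySem.Dict.getD d p.2 []) 0).getD ""])
      = (fun combination p => combination ++
          [if p.1 < (row.length : Int) then
            (PySem.List.pyGet? (PySem.Dict.getD d p.2 []) (PySem.Int.mod (PySem.List.pyGetD row p.1 0) (((PySem.Dict.getD d p.2 []).length : Int)))).getD ""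
          else
            (PySem.List.pyGet? (PySem.Dict.getD d p.2 []) 0).getD ""]) := by
      funext combination p
      split <;> rfl
    rw [hstep, PySem.List.foldl_append_singleton_eq_map]
    simp
  simp only [hfold]
  rw [PySem.List.foldl_append_singleton_eq_map, List.nil_append]
  by_cases hps0 : ps = []
  · simp [hps0]
  · rw [if_neg (by simp [hps0])]
    rw [pvZipStar_map
      (fun (p : Int × String) (row : List Int) =>
        if p.1 < 7 then
          (PySem.List.pyGet? (PySem.Dict.getD d p.2 []) (PySem.Int.mod (PySem.List.pyGetD row p.1 0) (((PySem.Dict.getD d p.2 []).length : Int)))).getD ""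
        else
          (PySem.List.pyGet? (PySem.Dict.getD d p.2 []) 0).getD "")
      pvL8Base ps hps0]
    apply List.map_congr_left
    intro row hrow
    rw [pvL8Base_row_len row hrow]
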